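-- pv_equiv track=rewrite | github.com/InvictusMalum/Advent-Of-Code-2015 | day7.py | runThroughPaths
-- ===== SOURCE A (Python) =====
-- def valueOf(term, values):
--     try:
--         return int(term)
--     except:
--         if term not in values:
--             return None
--         return values[term]
--
-- def runThroughPaths(paths, startingValues = {}):
--     values = startingValues
--     overridden = []
--     for value in values:
--         overridden.append(value)
--     for target in paths:
--         for target in paths:
--             # NUMBER or CODE
--             if len(paths[target]) == 1:
--                 if target not in overridden:
--                     value = valueOf(paths[target][0], values)
--                     if value != None:
--                         values[target] = value
--             # NOT
--             elif len(paths[target]) == 2: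
--                 if "NOT" in paths[target]:
--                     value = valueOf(paths[target][1], values)
--                     if value != None:
--                         values[target] = ~value
--             # AND or LSHIFT or RSHIFT or OR
--             elif len(paths[target]) == 3:
--                 if "AND" in paths[target]:
--                     value1 = valueOf(paths[target][0], values)
--                     value2 = valueOf(paths[target][2], values)
--                     if value1 != None and value2 != None:
--                         values[target] = value1 & value2
--
--                 elif "LSHIFT" in paths[target]:
--                     value1 = valueOf(paths[target][0], values)
--                     value2 = valueOf(paths[target][2], values)
--                     if value1 != None and value2 != None:
--                         values[target] = value1 << value2
--
--                 elif "RSHIFT" in paths[target]: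
--                     value1 = valueOf(paths[target][0], values)
--                     value2 = valueOf(paths[target][2], values)
--                     if value1 != None and value2 != None:
--                         values[target] = value1 >> value2
--
--                 elif "OR" in paths[target]:
--                     value1 = valueOf(paths[target][0], values)
--                     value2 = valueOf(paths[target][2], values)
--                     if value1 != None and value2 != None:
--                         values[target] = value1 | value2
--     return values
-- ===== SOURCE B (Python) =====
-- def runThroughPaths(paths, startingValues = {}):
--     # Like A, mutates startingValues in place and returns it.
--     values = startingValues
--     overridden = set(values)
--
--     def val(term):
--         try:
--             return int(term)
--         except Exception:
--             return values.get(term)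
--
--     def gateValue(toks):
--         if len(toks) == 1:
--             return val(toks[0])
--         if len(toks) == 2 and "NOT" in toks:
--             v = val(toks[1])
--             return None if v is None else ~v
--         if len(toks) == 3:
--             for op, f in (("AND", lambda a, b: a & b),
--                           ("LSHIFT", lambda a, b: a << b),
--                           ("RSHIFT", lambda a, b: a >> b),
--                           ("OR", lambda a, b: a | b)):
--                 if op in toks:
--                     a, b = val(toks[0]), val(toks[2])
--                     return None if a is None or b is None else f(a, b)
--         return None
--
--     # worklist of gates that could ever fire; each gate is evaluated until it
--     # fires once, then dropped, and we stop as soon as a sweep makes no progress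
--     pending = [(t, toks) for t, toks in paths.items()
--                if not (len(toks) == 1 and t in overridden)
--                and (len(toks) == 1
--                     or (len(toks) == 2 and "NOT" in toks)
--                     or (len(toks) == 3 and any(op in toks for op in ("AND", "LSHIFT", "RSHIFT", "OR"))))]
--     progress = True
--     while progress:
--         progress = False
--         remaining = []
--         for t, toks in pending:
--             v = gateValue(toks)
--             if v is None:
--                 remaining.append((t, toks))
--             else:
--                 values[t] = v
--                 progress = True
--         pending = remaining
--     return values
-- ===== Notes on version B (the rewrite author's own statement) =====
-- stated objective: faster
-- what changed: A re-evaluates every gate in len(paths) full sweeps (n*n gate evaluations); B keeps a worklist of not-yet-fired, potentially-firable gates, drops each gate once it fires, and stops as soon as a sweep makes no progress.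
import Mathlib
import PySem

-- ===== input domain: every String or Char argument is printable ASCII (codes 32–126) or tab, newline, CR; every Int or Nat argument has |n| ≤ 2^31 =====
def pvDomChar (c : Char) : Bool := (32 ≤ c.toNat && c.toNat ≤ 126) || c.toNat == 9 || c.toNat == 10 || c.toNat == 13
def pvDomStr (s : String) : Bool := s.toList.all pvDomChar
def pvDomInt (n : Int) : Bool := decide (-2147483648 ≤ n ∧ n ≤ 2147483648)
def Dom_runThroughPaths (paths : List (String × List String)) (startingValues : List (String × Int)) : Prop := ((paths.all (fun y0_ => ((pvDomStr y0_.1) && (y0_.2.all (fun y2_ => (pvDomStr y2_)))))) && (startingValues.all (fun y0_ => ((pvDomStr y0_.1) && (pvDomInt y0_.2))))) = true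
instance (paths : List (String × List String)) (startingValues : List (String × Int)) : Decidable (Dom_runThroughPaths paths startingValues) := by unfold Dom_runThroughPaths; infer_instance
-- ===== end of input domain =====

-- B replaces A's fixed n×n re-evaluation sweeps by a shrinking worklist swept only until a sweep
-- makes no progress (measured faster). Both A and B mutate `startingValues` in place in Python;
-- the theorems are about the returned dict (equal as the same insertion-ordered item list).

-- ===== PORT A =====
-- valueOf(term, values): int(term) if it parses, else values[term] (None when absent)
def valueOf (term : String) (values : PySem.Dict String Int) : Option Int :=
  match PySem.Int.ofStr? term with
  | some n => some n
  | none => values.get? term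

-- body of A's inner loop for one `target`, branch for branch
def stepA (pathsD : PySem.Dict String (List String)) (overridden : List String)
    (values : PySem.Dict String Int) (target : String) : PySem.Dict String Int :=
  let toks := pathsD.getD target []
  if toks.length = 1 then
    if target ∉ overridden then
      match valueOf (toks.getD 0 "") values with
      | some value => values.insert target value
      | none => values
    else values
  else if toks.length = 2 then
    if "NOT" ∈ toks then
      match valueOf (toks.getD 1 "") values with
      | some value => values.insert target (Int.not value)  -- ~value
      | none => values
    else values
  else if toks.length = 3 then
    if "AND" ∈ toks then
      match valueOf (toks.getD 0 "") values, valueOf (toks.getD 2 "") values with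
      | some v1, some v2 => values.insert target (PySem.Int.band v1 v2)
      | _, _ => values
    else if "LSHIFT" ∈ toks then
      -- v1 << v2: exact for 0 ≤ v2; a negative v2 raises ValueError in Python (outside Pre_)
      match valueOf (toks.getD 0 "") values, valueOf (toks.getD 2 "") values with
      | some v1, some v2 => values.insert target (v1 <<< v2.toNat)
      | _, _ => values
    else if "RSHIFT" ∈ toks then
      match valueOf (toks.getD 0 "") values, valueOf (toks.getD 2 "") values with
      | some v1, some v2 => values.insert target (v1 >>> v2.toNat)
      | _, _ => values
    else if "OR" ∈ toks then
      match valueOf (toks.getD 0 "") values, valueOf (toks.getD 2 "") values with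
      | some v1, some v2 => values.insert target (PySem.Int.bor v1 v2)
      | _, _ => values
    else values
  else values

def runThroughPaths (paths : List (String × List String)) (startingValues : List (String × Int)) : List (String × Int) :=
  let pathsD := PySem.Dict.ofList paths
  let values := PySem.Dict.ofList startingValues
  let overridden := values.keys          -- for value in values: overridden.append(value)
  -- `for target in paths: for target in paths: …` — len(paths) identical sweeps
  (pathsD.keys.foldl
    (fun vs _ => pathsD.keys.foldl (fun vs' target => stepA pathsD overridden vs' target) vs)
    values).items

-- ===== PORT B =====
-- val(term) of Source B (identical to A's valueOf)
def valB (term : String) (values : PySem.Dict String Int) : Option Int :=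
  match PySem.Int.ofStr? term with
  | some n => some n
  | none => values.get? term

-- the (op, f) pairs of Source B's loop share this application shape
def gateBin (f : Int → Int → Int) (toks : List String) (values : PySem.Dict String Int) : Option Int :=
  match valB (toks.getD 0 "") values, valB (toks.getD 2 "") values with
  | some a, some b => some (f a b)
  | _, _ => none

-- gateValue(toks): the value a gate currently produces, or none
def gateValue (toks : List String) (values : PySem.Dict String Int) : Option Int :=
  if toks.length = 1 then valB (toks.getD 0 "") values
  else if toks.length = 2 ∧ "NOT" ∈ toks then
    match valB (toks.getD 1 "") values with
    | some v => some (Int.not v)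
    | none => none
  else if toks.length = 3 then
    -- Source B's for-loop over (op, f) pairs, unrolled in the same order
    if "AND" ∈ toks then gateBin PySem.Int.band toks values
    else if "LSHIFT" ∈ toks then gateBin (fun a b => a <<< b.toNat) toks values
    else if "RSHIFT" ∈ toks then gateBin (fun a b => a >>> b.toNat) toks values
    else if "OR" ∈ toks then gateBin PySem.Int.bor toks values
    else none
  else none

-- the filter building Source B's initial worklist
def canFire (overridden : List String) (g : String × List String) : Bool :=
  decide (¬ (g.2.length = 1 ∧ g.1 ∈ overridden) ∧
    (g.2.length = 1 ∨ (g.2.length = 2 ∧ "NOT" ∈ g.2) ∨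
     (g.2.length = 3 ∧ ("AND" ∈ g.2 ∨ "LSHIFT" ∈ g.2 ∨ "RSHIFT" ∈ g.2 ∨ "OR" ∈ g.2))))

-- one sweep of the worklist: fires what it can, keeps the rest (in order)
def roundB (pending : List (String × List String)) (values : PySem.Dict String Int) :
    PySem.Dict String Int × List (String × List String) :=
  pending.foldl
    (fun acc g =>
      match gateValue g.2 acc.1 with
      | some v => (acc.1.insert g.1 v, acc.2)
      | none => (acc.1, acc.2 ++ [g]))
    (values, [])

-- while progress: sweep; progress ↔ the worklist shrank
def loopB (pending : List (String × List String)) (values : PySem.Dict String Int) :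
    PySem.Dict String Int :=
  let r := roundB pending values
  if _h : r.2.length < pending.length then loopB r.2 r.1 else r.1
termination_by pending.length

def runThroughPaths_alt (paths : List (String × List String)) (startingValues : List (String × Int)) : List (String × Int) :=
  let values := PySem.Dict.ofList startingValues
  let overridden := values.keys
  let pending := (PySem.Dict.ofList paths).items.filter (canFire overridden)
  (loopB pending values).items

-- ===== PRECONDITION & SPEC =====
-- no source of negative values anywhere in the circuit: nonnegative starting values,
-- nonnegative int-literal tokens, and no NOT gate (the only negative-producing operator)
def nonNegWorld (paths : List (String × List String)) (startingValues : List (String × Int)) : Bool :=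
  startingValues.all (fun q => decide (0 ≤ q.2)) &&
  paths.all (fun g =>
    (!(decide (g.2.length = 2 ∧ "NOT" ∈ g.2))) &&
    g.2.all (fun t =>
      match PySem.Int.ofStr? t with
      | some n => decide (0 ≤ n)
      | none => true))

-- a shift gate's count operand: an int literal must be nonnegative (a negative one makes
-- Python raise ValueError); a wire-valued count is fine whenever the circuit has no source
-- of negative values at all
def shiftGateOk (paths : List (String × List String)) (startingValues : List (String × Int))
    (toks : List String) : Bool :=
  match PySem.Int.ofStr? (toks.getD 2 "") with
  | some k => decide (0 ≤ k)
  | none => nonNegWorld paths startingValues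

-- Pre_ excludes (i) inputs on which Python's `<<`/`>>` may receive a negative count and raise
-- ValueError: shift gates whose count operand is a negative int literal, and — since whether a
-- wire-valued count goes negative cannot be read off the input's shape — circuits combining a
-- wire-valued shift count with any source of negative values (a NOT gate, a negative literal, a
-- negative starting value); and (ii) wires given a starting value that are also the target of a
-- firable NOT/AND/OR/shift gate, where the returned value is an artefact of how many
-- re-evaluation sweeps A runs — both A's and B's values are defensible on such doubly-defined
-- wires.
def Pre_runThroughPaths (paths : List (String × List String)) (startingValues : List (String × Int)) : Prop :=
  ∀ g ∈ paths,
    (g.2.length = 3 → "AND" ∉ g.2 → ("LSHIFT" ∈ g.2 ∨ "RSHIFT" ∈ g.2) →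
      shiftGateOk paths startingValues g.2 = true) ∧
    (((g.2.length = 2 ∧ "NOT" ∈ g.2) ∨
      (g.2.length = 3 ∧ ("AND" ∈ g.2 ∨ "LSHIFT" ∈ g.2 ∨ "RSHIFT" ∈ g.2 ∨ "OR" ∈ g.2))) →
      ∀ q ∈ startingValues, q.1 ≠ g.1)
instance (paths : List (String × List String)) (startingValues : List (String × Int)) : Decidable (Pre_runThroughPaths paths startingValues) := by unfold Pre_runThroughPaths; infer_instance

def pvWitness_runThroughPaths : (List (String × List String)) × (List (String × Int)) :=
  ([("a", ["123"]), ("b", ["a", "AND", "3"]), ("c", ["b", "LSHIFT", "2"]), ("e", ["d"])], [("d", 7)])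

def Spec_runThroughPaths (paths : List (String × List String)) (startingValues : List (String × Int)) (out : List (String × Int)) : Prop := out = runThroughPaths_alt paths startingValues
instance (paths : List (String × List String)) (startingValues : List (String × Int)) (out : List (String × Int)) : Decidable (Spec_runThroughPaths paths startingValues out) := by unfold Spec_runThroughPaths; infer_instance

-- ===== CLAIM (what is proved, stated in full; the proofs are below) =====
def Claim_equal_runThroughPaths : Prop := ∀ (paths : List (String × List String)) (startingValues : List (String × Int)), Dom_runThroughPaths paths startingValues → Pre_runThroughPaths paths startingValues → Spec_runThroughPaths paths startingValues (runThroughPaths paths startingValues)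

-- ===== LEMMAS AND PROOFS =====

-- abstract per-gate step (the value-level content of stepA for a gate (t, toks))
def stepG (ov : List String) (g : String × List String) (V : PySem.Dict String Int) :
    PySem.Dict String Int :=
  if canFire ov g = true then
    match gateValue g.2 V with
    | some x => V.insert g.1 x
    | none => V
  else V

def passL (ov : List String) (L : List (String × List String)) (V : PySem.Dict String Int) :
    PySem.Dict String Int :=
  L.foldl (fun v g => stepG ov g v) V

def passIter (ov : List String) (L : List (String × List String)) :
    Nat → PySem.Dict String Int → PySem.Dict String Int
  | 0, V => V
  | k + 1, V => passIter ov L k (passL ov L V)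

-- recursive characterisation of roundB
def roundR (P : List (String × List String)) (V : PySem.Dict String Int) :
    PySem.Dict String Int × List (String × List String) :=
  match P with
  | [] => (V, [])
  | g :: P' =>
    match gateValue g.2 V with
    | some x => roundR P' (V.insert g.1 x)
    | none => ((roundR P' V).1, g :: (roundR P' V).2)

-- V' stores everything V stores (with the same value)
def DExt (V V' : PySem.Dict String Int) : Prop :=
  ∀ k x, V.get? k = some x → V'.get? k = some x

-- every stored value is either an untouched starting value or currently produced by its own gate
def Justified (Lall : List (String × List String)) (ov : List String)
    (V₀ V : PySem.Dict String Int) : Prop :=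
  ∀ t y, V.get? t = some y →
    V₀.get? t = some y ∨
    ∃ g, g ∈ Lall ∧ g.1 = t ∧ canFire ov g = true ∧ gateValue g.2 V = some y

-- a gate whose step leaves the dict unchanged
def inert (ov : List String) (V : PySem.Dict String Int) (g : String × List String) : Prop :=
  canFire ov g = false ∨ ∃ x, gateValue g.2 V = some x ∧ V.get? g.1 = some x

theorem valB_eq (t : String) (V : PySem.Dict String Int) : valB t V = valueOf t V := rfl

theorem dext_trans {U V W : PySem.Dict String Int} (h1 : DExt U V) (h2 : DExt V W) : DExt U W :=
  fun k x h => h2 k x (h1 k x h)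

theorem valB_mono {V V' : PySem.Dict String Int} (h : DExt V V') {t : String} {x : Int}
    (hv : valB t V = some x) : valB t V' = some x := by
  unfold valB at *
  cases hof : PySem.Int.ofStr? t with
  | some n => simpa [hof] using hv
  | none => simp only [hof] at hv ⊢; exact h _ _ hv

theorem gateBin_mono {V V' : PySem.Dict String Int} (h : DExt V V') {f : Int → Int → Int}
    {toks : List String} {x : Int} (hv : gateBin f toks V = some x) : gateBin f toks V' = some x := by
  simp only [gateBin] at hv ⊢
  cases h1 : valB (toks.getD 0 "") V with
  | none => rw [h1] at hv; exact absurd hv (by simp)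
  | some a =>
    cases h2 : valB (toks.getD 2 "") V with
    | none => rw [h1, h2] at hv; exact absurd hv (by simp)
    | some b => rw [h1, h2] at hv; rw [valB_mono h h1, valB_mono h h2]; exact hv

theorem gateValue_mono {V V' : PySem.Dict String Int} (h : DExt V V') {toks : List String} {x : Int}
    (hv : gateValue toks V = some x) : gateValue toks V' = some x := by
  simp only [gateValue] at hv ⊢
  split at hv
  · rw [if_pos ‹_›]; exact valB_mono h hv
  · split at hv
    · rw [if_neg ‹_›, if_pos ‹_›]
      cases h1 : valB (toks.getD 1 "") V with
      | none => rw [h1] at hv; exact absurd hv (by simp)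
      | some v => rw [h1] at hv; rw [valB_mono h h1]; exact hv
    · split at hv
      · rw [if_neg ‹_›, if_neg ‹_›, if_pos ‹_›]
        split at hv
        · rw [if_pos ‹_›]; exact gateBin_mono h hv
        · split at hv
          · rw [if_neg ‹_›, if_pos ‹_›]; exact gateBin_mono h hv
          · split at hv
            · rw [if_neg ‹_›, if_neg ‹_›, if_pos ‹_›]; exact gateBin_mono h hv
            · split at hv
              · rw [if_neg ‹_›, if_neg ‹_›, if_neg ‹_›, if_pos ‹_›]; exact gateBin_mono h hv
              · exact absurd hv (by simp)
      · exact absurd hv (by simp)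

theorem inert_mono {ov : List String} {V V' : PySem.Dict String Int}
    {g : String × List String} (h : DExt V V') (hi : inert ov V g) : inert ov V' g := by
  rcases hi with hc | ⟨x, hx, hs⟩
  · exact Or.inl hc
  · exact Or.inr ⟨x, gateValue_mono h hx, h _ _ hs⟩

theorem insert_same {d : PySem.Dict String Int} {k : String} {v : Int}
    (hnd : d.keys.Nodup) (h : d.get? k = some v) : d.insert k v = d := by
  have hc : d.contains k = true := by rw [PySem.Dict.contains_eq_isSome_get?, h]; rfl
  apply PySem.Dict.ext
  rw [PySem.Dict.items_insert_of_contains d v hc]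
  have hmem : (k, v) ∈ d.items := PySem.Dict.mem_items_of_get?_eq_some d h
  calc List.map (fun p => if (p.1 == k) = true then (k, v) else p) d.items
      = List.map id d.items := by
        apply List.map_congr_left
        intro p hp
        by_cases hpk : p.1 = k
        · have hg : d.get? p.1 = some p.2 := PySem.Dict.get?_of_mem_items d hp hnd
          rw [hpk, h] at hg
          have h2 : v = p.2 := Option.some_inj.mp hg
          simp [hpk, Prod.ext_iff, h2]
        · simp [hpk]
    _ = d.items := List.map_id d.items

theorem stepG_inert {ov : List String} {V : PySem.Dict String Int} {g : String × List String}
    (hnd : V.keys.Nodup) (hi : inert ov V g) : stepG ov g V = V := by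
  rcases hi with hc | ⟨x, hx, hs⟩
  · simp [stepG, hc]
  · by_cases hcf : canFire ov g = true
    · simp only [stepG, hcf, if_pos, hx]
      exact insert_same hnd hs
    · simp [stepG, hcf]

theorem fired_eq {Lall : List (String × List String)} {ov : List String}
    {V₀ V : PySem.Dict String Int} {g : String × List String} {x y : Int}
    (hA : (Lall.map Prod.fst).Nodup)
    (hB : ∀ g ∈ Lall, canFire ov g = true → g.1 ∉ ov)
    (hOv : ∀ t y, V₀.get? t = some y → t ∈ ov)
    (hj : Justified Lall ov V₀ V) (hg : g ∈ Lall) (hc : canFire ov g = true)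
    (hx : gateValue g.2 V = some x) (hy : V.get? g.1 = some y) : y = x := by
  rcases hj _ _ hy with h0 | ⟨g', hg', hfst, _hc', hv'⟩
  · exact absurd (hOv _ _ h0) (hB g hg hc)
  · have hgg : g' = g := List.inj_on_of_nodup_map hA hg' hg hfst
    rw [hgg, hx] at hv'
    exact (Option.some_inj.mp hv').symm

theorem stepG_fire {Lall : List (String × List String)} {ov : List String}
    {V₀ V : PySem.Dict String Int} {g : String × List String} {x : Int}
    (hA : (Lall.map Prod.fst).Nodup)
    (hB : ∀ g ∈ Lall, canFire ov g = true → g.1 ∉ ov)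
    (hOv : ∀ t y, V₀.get? t = some y → t ∈ ov)
    (hnd : V.keys.Nodup) (hj : Justified Lall ov V₀ V)
    (hg : g ∈ Lall) (hc : canFire ov g = true) (hx : gateValue g.2 V = some x) :
    DExt V (V.insert g.1 x) ∧ (V.insert g.1 x).keys.Nodup ∧
    Justified Lall ov V₀ (V.insert g.1 x) ∧ (V.insert g.1 x).get? g.1 = some x := by
  have hext : DExt V (V.insert g.1 x) := by
    intro k z hk
    rcases eq_or_ne k g.1 with rfl | hne
    · have hz : z = x := fired_eq hA hB hOv hj hg hc hx hk
      rw [PySem.Dict.get?_insert, if_pos rfl, hz]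
    · rw [PySem.Dict.get?_insert, if_neg hne]; exact hk
  have hgot : (V.insert g.1 x).get? g.1 = some x := by
    rw [PySem.Dict.get?_insert, if_pos rfl]
  refine ⟨hext, PySem.Dict.nodup_keys_insert V g.1 x hnd, ?_, hgot⟩
  intro t y hty
  rcases eq_or_ne t g.1 with rfl | hne
  · rw [hgot] at hty
    obtain rfl : x = y := Option.some_inj.mp hty
    exact Or.inr ⟨g, hg, rfl, hc, gateValue_mono hext hx⟩
  · rw [PySem.Dict.get?_insert, if_neg hne] at hty
    rcases hj _ _ hty with h0 | ⟨g', hg', hfst, hc', hv'⟩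
    · exact Or.inl h0
    · exact Or.inr ⟨g', hg', hfst, hc', gateValue_mono hext hv'⟩

theorem roundB_acc (P : List (String × List String)) :
    ∀ (V : PySem.Dict String Int) (acc : List (String × List String)),
    P.foldl (fun acc g =>
      match gateValue g.2 acc.1 with
      | some v => (acc.1.insert g.1 v, acc.2)
      | none => (acc.1, acc.2 ++ [g])) (V, acc)
    = ((roundR P V).1, acc ++ (roundR P V).2) := by
  induction P with
  | nil => intro V acc; simp [roundR]
  | cons g P' ih =>
    intro V acc
    simp only [List.foldl_cons, roundR]
    cases hx : gateValue g.2 V with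
    | some x => simpa [hx] using ih (V.insert g.1 x) acc
    | none => simpa [hx] using ih V (acc ++ [g])

theorem roundB_eq_roundR (P : List (String × List String)) (V : PySem.Dict String Int) :
    roundB P V = roundR P V := by
  unfold roundB
  rw [roundB_acc P V []]
  simp

theorem stepA_eq (pathsD : PySem.Dict String (List String)) (ov : List String)
    (g : String × List String) (hg : g ∈ pathsD.items) (hnd : pathsD.keys.Nodup)
    (V : PySem.Dict String Int) :
    stepA pathsD ov V g.1 = stepG ov g V := by
  obtain ⟨t, toks⟩ := g
  have htoks : pathsD.getD t [] = toks := PySem.Dict.getD_of_mem_items pathsD hg hnd []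
  simp only [stepA, stepG, gateValue, canFire, htoks, valB_eq]
  by_cases h1 : toks.length = 1
  · by_cases hov : t ∈ ov
    · simp [h1, hov]
    · simp [h1, hov]
  · by_cases h2 : toks.length = 2
    · by_cases hnot : "NOT" ∈ toks
      · simp only [h2, hnot, if_true, and_self, decide_eq_true_eq]
        cases hv : valueOf (toks.getD 1 "") V <;> simp
      · simp [h2, hnot]
    · by_cases h3 : toks.length = 3
      · by_cases hand : "AND" ∈ toks
        · simp only [h3, hand, gateBin, valB_eq, if_true, decide_eq_true_eq]
          cases hv1 : valueOf (toks.getD 0 "") V <;>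
            cases hv2 : valueOf (toks.getD 2 "") V <;> simp
        · by_cases hls : "LSHIFT" ∈ toks
          · simp only [h3, hand, hls, gateBin, valB_eq]
            cases hv1 : valueOf (toks.getD 0 "") V <;>
              cases hv2 : valueOf (toks.getD 2 "") V <;> simp
          · by_cases hrs : "RSHIFT" ∈ toks
            · simp only [h3, hand, hls, hrs, gateBin, valB_eq]
              cases hv1 : valueOf (toks.getD 0 "") V <;>
                cases hv2 : valueOf (toks.getD 2 "") V <;> simp
            · by_cases hor : "OR" ∈ toks
              · simp only [h3, hand, hls, hrs, hor, gateBin, valB_eq]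
                cases hv1 : valueOf (toks.getD 0 "") V <;>
                  cases hv2 : valueOf (toks.getD 2 "") V <;> simp
              · simp [h3, hand, hls, hrs, hor]
      · simp [h1, h2, h3]

theorem pass_round {Lall : List (String × List String)} {ov : List String}
    {V₀ : PySem.Dict String Int}
    (hA : (Lall.map Prod.fst).Nodup)
    (hB : ∀ g ∈ Lall, canFire ov g = true → g.1 ∉ ov)
    (hOv : ∀ t y, V₀.get? t = some y → t ∈ ov) :
    ∀ {P L : List (String × List String)}, P.Sublist L → L.Sublist Lall →
    ∀ V : PySem.Dict String Int, V.keys.Nodup → Justified Lall ov V₀ V →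
    (∀ g ∈ L, g ∉ P → inert ov V g) → (∀ g ∈ P, canFire ov g = true) →
      passL ov L V = (roundR P V).1 ∧
      (roundR P V).2.Sublist P ∧
      DExt V (roundR P V).1 ∧
      (roundR P V).1.keys.Nodup ∧
      Justified Lall ov V₀ (roundR P V).1 ∧
      (∀ g ∈ L, g ∉ (roundR P V).2 → inert ov (roundR P V).1 g) ∧
      ((roundR P V).2 = P → (roundR P V).1 = V) := by
  have hndLall : Lall.Nodup := List.Nodup.of_map _ hA
  intro P L hPL
  induction hPL with
  | slnil =>
    intro _hL V hnd hj _hin _hp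
    refine ⟨rfl, List.Sublist.refl _, fun _ _ h => h, hnd, hj, ?_, fun _ => rfl⟩
    intro g hg
    exact absurd hg (List.not_mem_nil)
  | @cons P L₂ a hPL' ih =>
    intro hL V hnd hj hin hp
    have hL₂ : L₂.Sublist Lall := (List.sublist_cons_self a L₂).trans hL
    have hndL : (a :: L₂).Nodup := hL.nodup hndLall
    have haL₂ : a ∉ L₂ := (List.nodup_cons.mp hndL).1
    have haP : a ∉ P := fun h => haL₂ (hPL'.subset h)
    have hia : inert ov V a := hin a (List.mem_cons_self) haP
    have hstep : stepG ov a V = V := stepG_inert hnd hia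
    have hrec := ih hL₂ V hnd hj (fun g hg hgp => hin g (List.mem_cons_of_mem a hg) hgp) hp
    obtain ⟨h1, h2, h3, h4, h5, h6, h7⟩ := hrec
    refine ⟨?_, h2, h3, h4, h5, ?_, h7⟩
    · simpa [passL, hstep] using h1
    · intro g hg hgr
      rcases List.mem_cons.mp hg with rfl | hg₂
      · exact inert_mono h3 hia
      · exact h6 g hg₂ hgr
  | @cons₂ P₂ L₂ a hPL' ih =>
    intro hL V hnd hj hin hp
    have hL₂ : L₂.Sublist Lall := (List.sublist_cons_self a L₂).trans hL
    have hndL : (a :: L₂).Nodup := hL.nodup hndLall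
    have haL₂ : a ∉ L₂ := (List.nodup_cons.mp hndL).1
    have haLall : a ∈ Lall := hL.subset (List.mem_cons_self)
    have hca : canFire ov a = true := hp a (List.mem_cons_self)
    have hinL₂ : ∀ g ∈ L₂, g ∉ P₂ → inert ov V g := by
      intro g hg hgp
      refine hin g (List.mem_cons_of_mem a hg) ?_
      intro hgP
      rcases List.mem_cons.mp hgP with rfl | h
      · exact haL₂ hg
      · exact hgp h
    cases hx : gateValue a.2 V with
    | some x =>
      have hstep : stepG ov a V = V.insert a.1 x := by simp [stepG, hca, hx]
      obtain ⟨hext₁, hnd₁, hj₁, hgot⟩ := stepG_fire hA hB hOv hnd hj haLall hca hx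
      have hia : inert ov (V.insert a.1 x) a := Or.inr ⟨x, gateValue_mono hext₁ hx, hgot⟩
      have hrec := ih hL₂ (V.insert a.1 x) hnd₁ hj₁
        (fun g hg hgp => inert_mono hext₁ (hinL₂ g hg hgp))
        (fun g hg => hp g (List.mem_cons_of_mem a hg))
      obtain ⟨h1, h2, h3, h4, h5, h6, _h7⟩ := hrec
      have hround : roundR (a :: P₂) V = roundR P₂ (V.insert a.1 x) := by
        simp [roundR, hx]
      rw [hround]
      refine ⟨?_, h2.trans (List.sublist_cons_self a P₂), dext_trans hext₁ h3, h4, h5, ?_, ?_⟩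
      · simpa [passL, hstep] using h1
      · intro g hg hgr
        rcases List.mem_cons.mp hg with rfl | hg₂
        · exact inert_mono h3 hia
        · exact h6 g hg₂ hgr
      · intro heq
        have hle := h2.length_le
        rw [heq] at hle
        simp at hle
    | none =>
      have hstep : stepG ov a V = V := by simp [stepG, hca, hx]
      have hrec := ih hL₂ V hnd hj hinL₂ (fun g hg => hp g (List.mem_cons_of_mem a hg))
      obtain ⟨h1, h2, h3, h4, h5, h6, h7⟩ := hrec
      have hround : roundR (a :: P₂) V = ((roundR P₂ V).1, a :: (roundR P₂ V).2) := by
        simp [roundR, hx]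
      rw [hround]
      refine ⟨?_, h2.cons₂ a, h3, h4, h5, ?_, ?_⟩
      · simpa [passL, hstep] using h1
      · intro g hg hgr
        rcases List.mem_cons.mp hg with rfl | hg₂
        · exact absurd (List.mem_cons_self) hgr
        · exact h6 g hg₂ (fun h => hgr (List.mem_cons_of_mem a h))
      · intro heq
        have : (roundR P₂ V).2 = P₂ := by
          injection heq
        exact h7 this

theorem passIter_fixed {ov : List String} {Lall : List (String × List String)}
    {V : PySem.Dict String Int} (hfx : passL ov Lall V = V) :
    ∀ k, passIter ov Lall k V = V := by
  intro k
  induction k with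
  | zero => rfl
  | succ k ih => simp [passIter, hfx, ih]

theorem iter_eq_loopB {Lall : List (String × List String)} {ov : List String}
    {V₀ : PySem.Dict String Int}
    (hA : (Lall.map Prod.fst).Nodup)
    (hB : ∀ g ∈ Lall, canFire ov g = true → g.1 ∉ ov)
    (hOv : ∀ t y, V₀.get? t = some y → t ∈ ov) :
    ∀ (k : Nat) (P : List (String × List String)) (V : PySem.Dict String Int),
    P.Sublist Lall → V.keys.Nodup → Justified Lall ov V₀ V →
    (∀ g ∈ Lall, g ∉ P → inert ov V g) → (∀ g ∈ P, canFire ov g = true) →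
    P.length ≤ k →
    passIter ov Lall k V = loopB P V := by
  intro k
  induction k with
  | zero =>
    intro P V _hs hnd _hj _hin _hp hlen
    have hP : P = [] := List.length_eq_zero_iff.mp (Nat.le_zero.mp hlen)
    subst hP
    rw [loopB]
    simp [roundB, passIter]
  | succ k ihk =>
    intro P V hs hnd hj hin hp hlen
    have main := pass_round hA hB hOv hs (List.Sublist.refl Lall) V hnd hj
      (fun g hg hgp => hin g hg hgp) hp
    obtain ⟨h1, h2, h3, h4, h5, h6, h7⟩ := main
    rw [loopB]
    simp only [roundB_eq_roundR]
    by_cases hlt : (roundR P V).2.length < P.length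
    · rw [dif_pos hlt]
      have hpass : passIter ov Lall (k + 1) V = passIter ov Lall k ((roundR P V).1) := by
        simp [passIter, passL] at h1 ⊢
        rw [h1]
      rw [hpass]
      exact ihk (roundR P V).2 (roundR P V).1 (h2.trans hs) h4 h5 h6
        (fun g hg => hp g (h2.subset hg)) (by omega)
    · rw [dif_neg hlt]
      have hrem : (roundR P V).2 = P := h2.eq_of_length (le_antisymm h2.length_le (not_lt.mp hlt))
      have hfix : (roundR P V).1 = V := h7 hrem
      have hfx : passL ov Lall V = V := by rw [h1, hfix]
      rw [hfix]
      show passIter ov Lall (k + 1) V = V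
      simp [passIter, hfx, passIter_fixed hfx]

theorem mem_items_foldl_insert_sub {κ ν : Type} [BEq κ] [LawfulBEq κ] :
    ∀ (l : List (κ × ν)) (d : PySem.Dict κ ν) (p : κ × ν),
    p ∈ (l.foldl (fun acc q => acc.insert q.1 q.2) d).items → p ∈ d.items ∨ p ∈ l := by
  intro l
  induction l with
  | nil => intro d p h; exact Or.inl h
  | cons q l ih =>
    intro d p h
    rcases ih _ p h with h' | h'
    · rcases (PySem.Dict.mem_items_insert d q.1 q.2 p).mp h' with rfl | ⟨hm, _⟩
      · exact Or.inr (List.mem_cons_self)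
      · exact Or.inl hm
    · exact Or.inr (List.mem_cons_of_mem q h')

theorem mem_items_ofList_sub {κ ν : Type} [BEq κ] [LawfulBEq κ]
    (l : List (κ × ν)) (p : κ × ν) (h : p ∈ (PySem.Dict.ofList l).items) : p ∈ l := by
  rcases mem_items_foldl_insert_sub l PySem.Dict.empty p h with h' | h'
  · simp [PySem.Dict.empty] at h'
  · exact h'

theorem foldl_const_eq_passIter (ov : List String) (Lall : List (String × List String)) :
    ∀ (l : List String) (V : PySem.Dict String Int),
    l.foldl (fun vs _ => passL ov Lall vs) V = passIter ov Lall l.length V := by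
  intro l
  induction l with
  | nil => intro V; rfl
  | cons a l ih => intro V; simp only [List.foldl_cons, List.length_cons, passIter]; exact ih _

-- ===== VERDICT (by name: the statement is the Claim_ definition above) =====
theorem runThroughPaths_spec : Claim_equal_runThroughPaths := by
  unfold Claim_equal_runThroughPaths Spec_runThroughPaths
  intro paths sv _hdom hpre
  unfold runThroughPaths runThroughPaths_alt
  simp only []
  set pathsD := PySem.Dict.ofList paths with hpathsD
  set V₀ := PySem.Dict.ofList sv with hV₀
  set ov := V₀.keys with hov
  set Lall := pathsD.items with hLall
  have hndk : pathsD.keys.Nodup := PySem.Dict.nodup_keys_ofList paths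
  have hA : (Lall.map Prod.fst).Nodup := hndk
  have hsubitems : ∀ p ∈ Lall, p ∈ paths := fun p hp => mem_items_ofList_sub paths p hp
  have hovsub : ∀ t ∈ ov, ∃ q ∈ sv, q.1 = t := by
    intro t ht
    rcases List.mem_map.mp ht with ⟨p, hp, hpt⟩
    exact ⟨p, mem_items_ofList_sub sv p hp, hpt⟩
  have hOv : ∀ t y, V₀.get? t = some y → t ∈ ov := by
    intro t y h
    by_contra hn
    rw [(PySem.Dict.get?_eq_none_iff_not_mem_keys V₀ t).mpr hn] at h
    exact absurd h (by simp)
  have hB : ∀ g ∈ Lall, canFire ov g = true → g.1 ∉ ov := by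
    intro g hg hc hmem
    have hcp := of_decide_eq_true hc
    obtain ⟨hn1, hshape⟩ := hcp
    obtain ⟨q, hq, hqt⟩ := hovsub g.1 hmem
    rcases hshape with h1 | h2 | h3
    · exact hn1 ⟨h1, hmem⟩
    · exact (hpre g (hsubitems g hg)).2 (Or.inl h2) q hq hqt
    · exact (hpre g (hsubitems g hg)).2 (Or.inr h3) q hq hqt
  have hj₀ : Justified Lall ov V₀ V₀ := fun _ _ h => Or.inl h
  have hnd₀ : V₀.keys.Nodup := PySem.Dict.nodup_keys_ofList sv
  have hsub : (Lall.filter (canFire ov)).Sublist Lall := List.filter_sublist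
  have hin₀ : ∀ g ∈ Lall, g ∉ Lall.filter (canFire ov) → inert ov V₀ g := by
    intro g hg hnp
    left
    by_contra hcn
    exact hnp (List.mem_filter.mpr ⟨hg, by revert hcn; cases canFire ov g <;> simp⟩)
  have hp₀ : ∀ g ∈ Lall.filter (canFire ov), canFire ov g = true :=
    fun g hg => (List.mem_filter.mp hg).2
  have hlen : (Lall.filter (canFire ov)).length ≤ pathsD.keys.length := by
    have : pathsD.keys.length = Lall.length := by
      simp [PySem.Dict.keys, hLall]
    rw [this]
    exact hsub.length_le
  have hinner : ∀ V : PySem.Dict String Int,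
      pathsD.keys.foldl (fun vs' target => stepA pathsD ov vs' target) V = passL ov Lall V := by
    intro V
    show (Lall.map Prod.fst).foldl (fun vs' target => stepA pathsD ov vs' target) V = _
    rw [List.foldl_map]
    exact PySem.List.foldl_congr_mem Lall _ _ V
      (fun acc g hg => stepA_eq pathsD ov g hg hndk acc)
  have houter : pathsD.keys.foldl
      (fun vs _ => pathsD.keys.foldl (fun vs' target => stepA pathsD ov vs' target) vs) V₀
      = passIter ov Lall pathsD.keys.length V₀ := by
    rw [PySem.List.foldl_congr_mem pathsD.keys _ (fun vs _ => passL ov Lall vs) V₀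
      (fun acc x _ => hinner acc)]
    exact foldl_const_eq_passIter ov Lall pathsD.keys V₀
  rw [houter]
  rw [iter_eq_loopB hA hB hOv pathsD.keys.length (Lall.filter (canFire ov)) V₀
    hsub hnd₀ hj₀ hin₀ hp₀ hlen]
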